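-- pv_equiv track=rewrite | github.com/bartz-dev/tek2 | Functionnal/B-SYN-400-LYN-4-1-autoCompletion-clement.fleur/matcher.py | sort_choice
-- ===== SOURCE A (Python) =====
-- class choice:
--     def __init__(self, value, key):
--         self.value = value
--         self.key = key
--
--     def get_value(self):
--         return self.value
--
--     def __str__(self) -> str:
--         return str(self.value)
--
--     def __repr__(self) -> str:
--         return str(self.value)
--
-- def find_city_nbr(dict, city):
--     counter = 0
--     for elem in dict:
--         if (elem[:len(city)].lower()  == city.lower()):
--             counter = counter + 1
--     return counter
--
-- def check_upper_order(tmp, mp):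
--         tmp.sort(key=lambda x: ord(x.key[len(x.key) - 1]))
--         return tmp
--
-- def sort_choice(mp, dict):
--     tmp = list()
--     new_tmp = list()
--     mp.sort(key=lambda x: ord(x[len(x) - 1]), reverse=True)
--     for elem in mp:
--         new_tmp.append(choice(find_city_nbr(dict, elem), elem))
--     tmp.clear
--     new_tmp = check_upper_order(new_tmp, mp)
--     new_tmp.sort(key=lambda x: int(x.value), reverse=True)
--     for elem in new_tmp:
--         tmp.append(elem.key)
--     return tmp
-- ===== SOURCE B (Python) =====
-- def sort_choice(mp, dict):
--     # Count, once, every lowercased prefix of every dictionary word, then a single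
--     # stable sort of mp by (-match count, ord(last letter)).
--     cnt = {}
--     for word in dict:
--         w = word.lower()
--         for i in range(len(w) + 1):
--             p = w[:i]
--             cnt[p] = cnt.get(p, 0) + 1
--     return sorted(mp, key=lambda x: (-cnt.get(x.lower(), 0), ord(x[-1])))
-- ===== Notes on version B (the rewrite author's own statement) =====
-- stated objective: faster
-- what changed: B replaces A's per-candidate linear scan of the whole dictionary and A's chain of three stable sorts by a prefix-count table built once over the lowercased dictionary plus a single stable sort of mp by the tuple key (-match count, ord(last letter)); Pre_ excludes only inputs where A raises (an empty string in mp, IndexError on x[len(x)-1]).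
import Mathlib
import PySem

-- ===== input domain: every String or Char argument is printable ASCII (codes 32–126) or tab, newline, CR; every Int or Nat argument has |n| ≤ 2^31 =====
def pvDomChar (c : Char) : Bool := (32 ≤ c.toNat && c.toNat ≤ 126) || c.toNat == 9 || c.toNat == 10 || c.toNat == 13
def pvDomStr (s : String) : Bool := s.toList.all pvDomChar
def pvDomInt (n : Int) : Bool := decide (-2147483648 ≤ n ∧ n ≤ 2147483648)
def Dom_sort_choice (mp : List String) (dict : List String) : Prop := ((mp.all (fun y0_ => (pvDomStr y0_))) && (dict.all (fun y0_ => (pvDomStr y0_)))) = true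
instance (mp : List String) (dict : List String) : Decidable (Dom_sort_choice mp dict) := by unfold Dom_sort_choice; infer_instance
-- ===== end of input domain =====

-- B builds a prefix-count table over the lowercased dictionary once and does ONE stable sort of mp
-- by (-match count, ord(last letter)) instead of A's per-candidate dictionary scans and three sorts.
-- (Python A sorts mp in place; the equivalence proved here is about the RETURN value only.)


-- ===== PORT A =====
-- Python: ord(x[len(x) - 1]) — total here via a default character; exact whenever x ≠ "" (Pre_).
def pvLastOrd (x : String) : Int :=
  (((PySem.Str.pyGet? x (PySem.Str.len x - 1)).getD 'a').toNat : Int)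

def find_city_nbr (dict : List String) (city : String) : Int :=
  dict.foldl (fun counter elem =>
    if PySem.Str.lower (PySem.Str.slice elem none (some (PySem.Str.len city))) == PySem.Str.lower city
    then counter + 1 else counter) 0

-- a `choice` object is its (value, key) pair
def check_upper_order (tmp : List (Int × String)) (_mp : List String) : List (Int × String) :=
  PySem.List.sorted tmp (fun x => pvLastOrd x.2)

def sort_choice (mp : List String) (dict : List String) : List String :=
  let mp1 := PySem.List.sorted mp (fun x => pvLastOrd x) true
  let new_tmp := mp1.foldl (fun acc elem => acc ++ [(find_city_nbr dict elem, elem)]) []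
  -- `tmp.clear` in the Python is a bare attribute access, a no-op
  let new_tmp2 := check_upper_order new_tmp mp1
  -- int(x.value) is the identity: the values are ints
  let new_tmp3 := PySem.List.sorted new_tmp2 (fun x => x.1) true
  new_tmp3.foldl (fun acc x => acc ++ [x.2]) []

-- ===== PORT B =====
def pvPrefixCounts (dict : List String) : PySem.Dict String Int :=
  dict.foldl (fun d word =>
    let w := PySem.Str.lower word
    (PySem.List.pyRange 0 (PySem.Str.len w + 1)).foldl (fun d i =>
      let p := PySem.Str.slice w none (some i)
      d.insert p (d.getD p 0 + 1)) d) PySem.Dict.empty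

def sort_choice_alt (mp : List String) (dict : List String) : List String :=
  let cnt := pvPrefixCounts dict
  PySem.List.sorted2 mp (fun x => -(cnt.getD (PySem.Str.lower x) 0)) (fun x => pvLastOrd x)

-- ===== PRECONDITION & SPEC =====
-- Pre_ excludes exactly the inputs where Python A raises: an empty string in mp makes
-- the sort key x[len(x) - 1] raise IndexError (Python B raises there too).
def Pre_sort_choice (mp : List String) (dict : List String) : Prop := ∀ s ∈ mp, s.toList ≠ []
instance (mp : List String) (dict : List String) : Decidable (Pre_sort_choice mp dict) := by
  unfold Pre_sort_choice; infer_instance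

def pvWitness_sort_choice : List String × List String := (["ab", "c"], ["ab", "ad", "c"])

def Spec_sort_choice (mp : List String) (dict : List String) (out : List String) : Prop := out = sort_choice_alt mp dict
instance (mp : List String) (dict : List String) (out : List String) : Decidable (Spec_sort_choice mp dict out) := by unfold Spec_sort_choice; infer_instance

-- ===== CLAIM (what is proved, stated in full; the proofs are below) =====
def Claim_equal_sort_choice : Prop := ∀ (mp : List String) (dict : List String), Dom_sort_choice mp dict → Pre_sort_choice mp dict → Spec_sort_choice mp dict (sort_choice mp dict)

-- ===== LEMMAS AND PROOFS =====

-- ---- generic stable-sort machinery for PySem.List.insertBy / sorted ----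

theorem pv_insertBy_congr {α : Type} (b1 b2 : α → α → Bool) (h : ∀ a c, b1 a c = b2 a c)
    (x : α) (ys : List α) : PySem.List.insertBy b1 x ys = PySem.List.insertBy b2 x ys := by
  induction ys with
  | nil => simp [PySem.List.insertBy]
  | cons y ys ih => simp [PySem.List.insertBy, h, ih]

theorem pv_foldl_insertBy_congr {α : Type} (b1 b2 : α → α → Bool) (h : ∀ a c, b1 a c = b2 a c)
    (xs acc : List α) :
    xs.foldl (fun acc x => PySem.List.insertBy b1 x acc) acc
      = xs.foldl (fun acc x => PySem.List.insertBy b2 x acc) acc := by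
  simp only [pv_insertBy_congr b1 b2 h]

theorem pv_sorted_snoc {α κ : Type} [LinearOrder κ] (xs : List α) (x : α) (key : α → κ) (rev : Bool) :
    PySem.List.sorted (xs ++ [x]) key rev
      = PySem.List.insertBy
          (if rev then fun a b => decide (key b < key a) else fun a b => decide (key a < key b))
          x (PySem.List.sorted xs key rev) := by
  cases rev
  · rw [PySem.List.sorted_eq_foldl_insertBy, PySem.List.sorted_eq_foldl_insertBy]
    simp [List.foldl_append]
  · rw [PySem.List.sorted_rev_eq_foldl_insertBy, PySem.List.sorted_rev_eq_foldl_insertBy]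
    simp [List.foldl_append]

theorem pv_filter_insertBy_asc {α κ : Type} [LinearOrder κ] (key : α → κ) (v : κ) (x : α)
    (ys : List α) (hs : ys.Pairwise (fun a b => key a ≤ key b)) :
    (PySem.List.insertBy (fun a b => decide (key a < key b)) x ys).filter (fun y => decide (key y = v))
      = ys.filter (fun y => decide (key y = v)) ++ if key x = v then [x] else [] := by
  induction ys with
  | nil =>
    by_cases hv : key x = v <;> simp [PySem.List.insertBy, List.filter, hv]
  | cons y ys ih =>
    rcases List.pairwise_cons.mp hs with ⟨hy, ht⟩
    have hstep : PySem.List.insertBy (fun a b => decide (key a < key b)) x (y :: ys)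
        = if decide (key x < key y) = true then x :: y :: ys
          else y :: PySem.List.insertBy (fun a b => decide (key a < key b)) x ys := by
      simp [PySem.List.insertBy]
    rw [hstep]
    by_cases hxy : key x < key y
    · rw [if_pos (by simpa using hxy)]
      by_cases hv : key x = v
      · have hnil : (y :: ys).filter (fun w => decide (key w = v)) = [] := by
          rw [List.filter_eq_nil_iff]
          intro a ha
          have hya : key y ≤ key a := by
            rcases List.mem_cons.mp ha with rfl | ha'
            · exact le_refl _
            · exact hy a ha'
          simp only [decide_eq_true_eq]
          intro hav
          have : key x < key x := by
            calc key x < key y := hxy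
              _ ≤ key a := hya
              _ = key x := by rw [hav, hv]
          exact lt_irrefl _ this
        simp [List.filter_cons, hv, hnil]
      · simp [List.filter_cons, hv]
    · rw [if_neg (by simpa using hxy)]
      rw [List.filter_cons, List.filter_cons, ih ht]
      by_cases hyv : key y = v <;> simp [hyv]

theorem pv_filter_insertBy_desc {α κ : Type} [LinearOrder κ] (key : α → κ) (v : κ) (x : α)
    (ys : List α) (hs : ys.Pairwise (fun a b => key b ≤ key a)) :
    (PySem.List.insertBy (fun a b => decide (key b < key a)) x ys).filter (fun y => decide (key y = v))
      = ys.filter (fun y => decide (key y = v)) ++ if key x = v then [x] else [] := by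
  induction ys with
  | nil =>
    by_cases hv : key x = v <;> simp [PySem.List.insertBy, List.filter, hv]
  | cons y ys ih =>
    rcases List.pairwise_cons.mp hs with ⟨hy, ht⟩
    have hstep : PySem.List.insertBy (fun a b => decide (key b < key a)) x (y :: ys)
        = if decide (key y < key x) = true then x :: y :: ys
          else y :: PySem.List.insertBy (fun a b => decide (key b < key a)) x ys := by
      simp [PySem.List.insertBy]
    rw [hstep]
    by_cases hxy : key y < key x
    · rw [if_pos (by simpa using hxy)]
      by_cases hv : key x = v
      · have hnil : (y :: ys).filter (fun w => decide (key w = v)) = [] := by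
          rw [List.filter_eq_nil_iff]
          intro a ha
          have hya : key a ≤ key y := by
            rcases List.mem_cons.mp ha with rfl | ha'
            · exact le_refl _
            · exact hy a ha'
          simp only [decide_eq_true_eq]
          intro hav
          have : key x < key x := by
            calc key x = key a := by rw [hav, hv]
              _ ≤ key y := hya
              _ < key x := hxy
          exact lt_irrefl _ this
        simp [List.filter_cons, hv, hnil]
      · simp [List.filter_cons, hv]
    · rw [if_neg (by simpa using hxy)]
      rw [List.filter_cons, List.filter_cons, ih ht]
      by_cases hyv : key y = v <;> simp [hyv]

-- stability: filtering a stably sorted list at one key value gives the unsorted list's filter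
theorem pv_filter_sorted {α κ : Type} [LinearOrder κ] (xs : List α) (key : α → κ) (rev : Bool) (v : κ) :
    (PySem.List.sorted xs key rev).filter (fun y => decide (key y = v))
      = xs.filter (fun y => decide (key y = v)) := by
  induction xs using List.reverseRecOn with
  | nil => cases rev <;> rfl
  | append_singleton xs x ih =>
    rw [pv_sorted_snoc, List.filter_append]
    cases rev
    · simp only [Bool.false_eq_true, if_false]
      rw [pv_filter_insertBy_asc key v x _ (PySem.List.sorted_pairwise xs key), ih]
      congr 1
      by_cases hv : key x = v <;> simp [List.filter, hv]
    · simp only [if_true]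
      rw [pv_filter_insertBy_desc key v x _ (PySem.List.sorted_pairwise_rev xs key), ih]
      congr 1
      by_cases hv : key x = v <;> simp [List.filter, hv]

-- a key-nondecreasing list with given per-key filters is unique
theorem pv_stable_unique {α κ : Type} [LinearOrder κ] (key : α → κ) (ys zs : List α)
    (hy : ys.Pairwise (fun a b => key a ≤ key b)) (hz : zs.Pairwise (fun a b => key a ≤ key b))
    (hf : ∀ v, ys.filter (fun y => decide (key y = v)) = zs.filter (fun y => decide (key y = v))) :
    ys = zs := by
  induction ys generalizing zs with
  | nil =>
    cases zs with
    | nil => rfl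
    | cons z u =>
      have h := hf (key z)
      rw [List.filter_nil, List.filter_cons, if_pos (by simp)] at h
      exact absurd h (by simp)
  | cons y t ih =>
    cases zs with
    | nil =>
      have h := hf (key y)
      rw [List.filter_nil, List.filter_cons, if_pos (by simp)] at h
      exact absurd h (by simp)
    | cons z u =>
      rcases List.pairwise_cons.mp hy with ⟨hyt, hyt'⟩
      rcases List.pairwise_cons.mp hz with ⟨hzu, hzu'⟩
      have hkey : key y = key z := by
        by_contra hne
        have hyy : (decide (key y = key y)) = true := by simp
        have hzz : (decide (key z = key z)) = true := by simp
        have hzy : ¬ ((decide (key z = key y)) = true) := by simpa using fun h => hne h.symm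
        have hyz : ¬ ((decide (key y = key z)) = true) := by simpa using hne
        have h1 := hf (key y)
        rw [List.filter_cons, List.filter_cons, if_pos hyy, if_neg hzy] at h1
        have hymem : y ∈ u := by
          have : y ∈ u.filter (fun w => decide (key w = key y)) := by
            rw [← h1]; exact List.mem_cons_self
          exact (List.mem_filter.mp this).1
        have h2 := hf (key z)
        rw [List.filter_cons, List.filter_cons, if_pos hzz, if_neg hyz] at h2
        have hzmem : z ∈ t := by
          have : z ∈ t.filter (fun w => decide (key w = key z)) := by
            rw [h2]; exact List.mem_cons_self
          exact (List.mem_filter.mp this).1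
        exact hne (le_antisymm (hyt z hzmem) (hzu y hymem))
      have h1 := hf (key y)
      rw [List.filter_cons, List.filter_cons, if_pos (by simp),
        if_pos (by simpa using hkey.symm)] at h1
      injection h1 with hyz h1t
      subst hyz
      have htail : t = u := by
        refine ih u hyt' hzu' (fun v => ?_)
        have h3 := hf v
        by_cases hv : key y = v
        · rw [List.filter_cons, List.filter_cons, if_pos (by simpa using hv),
            if_pos (by simpa using hv)] at h3
          injection h3
        · rwa [List.filter_cons, List.filter_cons, if_neg (by simpa using hv),
            if_neg (by simpa using hv)] at h3
      rw [htail]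

theorem pv_insertBy_map {α β : Type} (b : β → β → Bool) (f : α → β) (x : α) (ys : List α) :
    PySem.List.insertBy b (f x) (ys.map f)
      = (PySem.List.insertBy (fun a c => b (f a) (f c)) x ys).map f := by
  induction ys with
  | nil => simp [PySem.List.insertBy]
  | cons y ys ih => by_cases h : b (f x) (f y) <;> simp [PySem.List.insertBy, h, ih]

theorem pv_sorted_map {α β κ : Type} [LinearOrder κ] (f : α → β) (xs : List α) (key : β → κ) (rev : Bool) :
    PySem.List.sorted (xs.map f) key rev
      = (PySem.List.sorted xs (fun x => key (f x)) rev).map f := by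
  induction xs using List.reverseRecOn with
  | nil => cases rev <;> rfl
  | append_singleton xs x ih =>
    rw [List.map_append, List.map_singleton, pv_sorted_snoc, pv_sorted_snoc, ih]
    cases rev <;> simp [pv_insertBy_map]

theorem pv_sorted_rev_neg {α : Type} (xs : List α) (k : α → Int) :
    PySem.List.sorted xs k true = PySem.List.sorted xs (fun x => -(k x)) false := by
  rw [PySem.List.sorted_rev_eq_foldl_insertBy, PySem.List.sorted_eq_foldl_insertBy]
  exact pv_foldl_insertBy_congr _ _
    (fun a c => by rw [decide_eq_decide]; omega) xs []

theorem pv_sorted_sorted_rev {α κ : Type} [LinearOrder κ] (xs : List α) (key : α → κ) :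
    PySem.List.sorted (PySem.List.sorted xs key true) key = PySem.List.sorted xs key := by
  refine pv_stable_unique key _ _ (PySem.List.sorted_pairwise _ _) (PySem.List.sorted_pairwise _ _)
    (fun v => by rw [pv_filter_sorted, pv_filter_sorted, pv_filter_sorted])

theorem pv_filter_comm {α : Type} (p q : α → Bool) (l : List α) :
    (l.filter p).filter q = (l.filter q).filter p := by
  rw [List.filter_filter, List.filter_filter]
  exact List.filter_congr (fun a _ => Bool.and_comm _ _)

theorem pv_pairwise_combined {α : Type} (k1 k2 : α → Int)
    (hb : ∀ x, 0 ≤ k2 x ∧ k2 x < 2097152) (ys : List α)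
    (h1 : ys.Pairwise (fun a b => k1 a ≤ k1 b))
    (h2 : ∀ v, (ys.filter (fun y => decide (k1 y = v))).Pairwise (fun a b => k2 a ≤ k2 b)) :
    ys.Pairwise (fun a b => k1 a * 2097152 + k2 a ≤ k1 b * 2097152 + k2 b) := by
  induction ys with
  | nil => exact List.Pairwise.nil
  | cons y t ih =>
    rcases List.pairwise_cons.mp h1 with ⟨h1y, h1t⟩
    refine List.pairwise_cons.mpr ⟨?_, ih h1t (fun v => ?_)⟩
    · intro b hbmem
      have hk1 : k1 y ≤ k1 b := h1y b hbmem
      rcases eq_or_lt_of_le hk1 with heq | hlt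
      · have hfil := h2 (k1 y)
        rw [List.filter_cons, if_pos (by simp)] at hfil
        rcases List.pairwise_cons.mp hfil with ⟨hhead, _⟩
        have hbf : b ∈ t.filter (fun w => decide (k1 w = k1 y)) :=
          List.mem_filter.mpr ⟨hbmem, by simp [heq.symm]⟩
        have hk2 := hhead b hbf
        rw [← heq]
        omega
      · have hby := hb y
        have hbb := hb b
        have : k1 y + 1 ≤ k1 b := hlt
        nlinarith [hby.1, hby.2, hbb.1, hbb.2]
    · have hsub : (t.filter (fun w => decide (k1 w = v))).Sublist
          ((y :: t).filter (fun w => decide (k1 w = v))) := by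
        rw [List.filter_cons]
        by_cases hd : (decide (k1 y = v)) = true <;> simp [hd]
      exact List.Pairwise.sublist hsub (h2 v)

-- two chained stable sorts are one stable sort by the combined key (second key below 2^21)
theorem pv_two_pass {α : Type} (k1 k2 : α → Int) (hb : ∀ x, 0 ≤ k2 x ∧ k2 x < 2097152) (xs : List α) :
    PySem.List.sorted (PySem.List.sorted xs k2) k1
      = PySem.List.sorted xs (fun x => k1 x * 2097152 + k2 x) := by
  refine pv_stable_unique (fun x => k1 x * 2097152 + k2 x) _ _ ?_ (PySem.List.sorted_pairwise _ _)
    (fun v => ?_)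
  · refine pv_pairwise_combined k1 k2 hb _ (PySem.List.sorted_pairwise _ _) (fun v => ?_)
    rw [pv_filter_sorted]
    exact List.Pairwise.sublist List.filter_sublist (PySem.List.sorted_pairwise _ _)
  · obtain ⟨q, r, hv, hr0, hrlt⟩ : ∃ q r, v = q * 2097152 + r ∧ 0 ≤ r ∧ r < 2097152 := by
      refine ⟨v / 2097152, v % 2097152, ?_, Int.emod_nonneg v (by norm_num),
        Int.emod_lt_of_pos v (by norm_num)⟩
      have := Int.mul_ediv_add_emod v 2097152
      omega
    have hpoint : ∀ (l : List α), l.filter (fun y => decide (k1 y * 2097152 + k2 y = v))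
        = (l.filter (fun y => decide (k1 y = q))).filter (fun y => decide (k2 y = r)) := by
      intro l
      rw [List.filter_filter]
      refine List.filter_congr (fun a _ => ?_)
      have ha := hb a
      by_cases h1 : k1 a = q <;> by_cases h2 : k2 a = r <;> simp [h1, h2, hv] <;> omega
    rw [pv_filter_sorted xs (fun x => k1 x * 2097152 + k2 x) false v, hpoint, hpoint,
      pv_filter_sorted (PySem.List.sorted xs k2) k1 false q,
      pv_filter_comm (fun y => decide (k1 y = q)) (fun y => decide (k2 y = r)) (PySem.List.sorted xs k2),
      pv_filter_sorted xs k2 false r,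
      pv_filter_comm (fun y => decide (k2 y = r)) (fun y => decide (k1 y = q)) xs]

-- sorted2 with a bounded second key is sorted by the combined key
theorem pv_sorted2_eq {α : Type} (xs : List α) (k1 k2 : α → Int)
    (hb : ∀ x, 0 ≤ k2 x ∧ k2 x < 2097152) :
    PySem.List.sorted2 xs k1 k2 = PySem.List.sorted xs (fun x => k1 x * 2097152 + k2 x) := by
  have hb' : ∀ a c : α, (decide (k1 a < k1 c) || (!decide (k1 c < k1 a) && decide (k2 a < k2 c)))
      = decide (k1 a * 2097152 + k2 a < k1 c * 2097152 + k2 c) := by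
    intro a c
    have ha := hb a
    have hc := hb c
    by_cases hx : k1 a < k1 c <;> by_cases hy : k1 c < k1 a <;> by_cases hz : k2 a < k2 c <;>
      simp [hx, hy, hz] <;> nlinarith [ha.1, ha.2, hc.1, hc.2]
  rw [PySem.List.sorted_eq_foldl_insertBy]
  simp only [PySem.List.sorted2, Bool.false_eq_true, if_false]
  exact pv_foldl_insertBy_congr _ _ hb' xs []

theorem pv_lastOrd_bounds (x : String) : 0 ≤ pvLastOrd x ∧ pvLastOrd x < 2097152 := by
  unfold pvLastOrd
  refine ⟨Int.natCast_nonneg _, ?_⟩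
  have h : ((PySem.Str.pyGet? x (PySem.Str.len x - 1)).getD 'a').val.toNat < 55296 ∨
      57343 < ((PySem.Str.pyGet? x (PySem.Str.len x - 1)).getD 'a').val.toNat ∧
        ((PySem.Str.pyGet? x (PySem.Str.len x - 1)).getD 'a').val.toNat < 1114112 :=
    ((PySem.Str.pyGet? x (PySem.Str.len x - 1)).getD 'a').valid
  have h2 : ((PySem.Str.pyGet? x (PySem.Str.len x - 1)).getD 'a').toNat
      = ((PySem.Str.pyGet? x (PySem.Str.len x - 1)).getD 'a').val.toNat := rfl
  omega

-- ---- counting: A's linear scan = B's prefix-count table ----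

theorem pv_sum_ite {α : Type} (l : List α) (p : α → Bool) :
    (l.map (fun a => if p a then 1 else 0)).sum = l.countP p := by
  induction l with
  | nil => rfl
  | cons a t ih => cases hpa : p a <;> simp [List.countP_cons, ih, hpa] <;> omega

theorem pv_match_iff (city elem : String) :
    PySem.Str.lower (PySem.Str.slice elem none (some (PySem.Str.len city))) = PySem.Str.lower city
      ↔ PySem.Chars.lower city.toList <+: PySem.Chars.lower elem.toList := by
  rw [← String.toList_inj, PySem.Str.toList_lower, PySem.Str.toList_lower, PySem.Str.toList_slice,
    PySem.Chars.slice_eq_listSlice, PySem.List.slice_to _ (by rw [PySem.Str.len_eq]; positivity)]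
  have hn : (PySem.Str.len city).toNat = city.toList.length := by
    rw [PySem.Str.len_eq]; simp
  rw [hn]
  unfold PySem.Chars.lower
  rw [List.map_take, List.prefix_iff_eq_take, List.length_map]
  constructor
  · intro h; rw [h]
  · intro h; rw [← h]

theorem pv_find_eq_countP (dict : List String) (city : String) :
    find_city_nbr dict city
      = (dict.countP (fun word => decide ((PySem.Chars.lower city.toList) <+: (PySem.Chars.lower word.toList))) : Int) := by
  suffices h : ∀ (l : List String) (a : Int),
      l.foldl (fun counter elem =>
        if PySem.Str.lower (PySem.Str.slice elem none (some (PySem.Str.len city))) == PySem.Str.lower city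
        then counter + 1 else counter) a
      = a + (l.countP (fun word => decide ((PySem.Chars.lower city.toList) <+: (PySem.Chars.lower word.toList))) : Int) by
    unfold find_city_nbr
    rw [h dict 0, zero_add]
  intro l
  induction l with
  | nil => intro a; simp
  | cons e t ih =>
    intro a
    rw [List.foldl_cons, List.countP_cons]
    by_cases hm : PySem.Str.lower (PySem.Str.slice e none (some (PySem.Str.len city))) = PySem.Str.lower city
    · have hd : decide ((PySem.Chars.lower city.toList) <+: (PySem.Chars.lower e.toList)) = true := by
        simpa using (pv_match_iff city e).mp hm
      rw [if_pos (by simpa using hm), ih, hd]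
      simp
      omega
    · have hd : decide ((PySem.Chars.lower city.toList) <+: (PySem.Chars.lower e.toList)) = false := by
        simpa using fun hh => hm ((pv_match_iff city e).mpr hh)
      rw [if_neg (by simpa using hm), ih, hd]
      simp

theorem pv_count_slices (w p : String) :
    ((PySem.List.pyRange 0 (PySem.Str.len w + 1)).map (fun i => PySem.Str.slice w none (some i))).count p
      = if p.toList <+: w.toList then 1 else 0 := by
  have h1 : PySem.Str.len w + 1 = ((w.toList.length + 1 : Nat) : Int) := by
    rw [PySem.Str.len_eq]; push_cast; ring
  rw [h1, PySem.List.pyRange_zero_natCast, List.map_map, List.count_eq_countP, List.countP_map]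
  have hkey : ∀ k : Nat, ((PySem.Str.slice w none (some (k : Int)) == p) = true) ↔ (w.toList.take k = p.toList) := by
    intro k
    rw [beq_iff_eq, ← String.toList_inj, PySem.Str.toList_slice, PySem.Chars.slice_eq_listSlice,
      PySem.List.slice_to _ (Int.natCast_nonneg k)]
    simp
  by_cases hp : p.toList <+: w.toList
  · rw [if_pos hp]
    have hlen : p.toList.length ≤ w.toList.length := hp.length_le
    have hstep : List.countP ((fun a => a == p) ∘ (fun i => PySem.Str.slice w none (some i)) ∘ (fun k : Nat => (k : Int)))
          (List.range (w.toList.length + 1))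
        = List.countP (fun k => k == p.toList.length) (List.range (w.toList.length + 1)) := by
      refine List.countP_congr (fun k hk => ?_)
      have hk' : k ≤ w.toList.length := Nat.lt_succ_iff.mp (List.mem_range.mp hk)
      simp only [Function.comp_apply, hkey k, beq_iff_eq]
      constructor
      · intro h
        have hlen2 := congrArg List.length h
        rw [List.length_take] at hlen2
        omega
      · intro h
        subst h
        exact (List.prefix_iff_eq_take.mp hp).symm
    rw [hstep, ← List.count_eq_countP, List.count_range, if_pos (by omega)]
  · rw [if_neg hp]
    rw [List.countP_eq_zero]
    intro k _
    simp only [Function.comp_apply, hkey k]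
    intro h
    exact hp (h ▸ List.take_prefix k w.toList)

theorem pv_getD_prefixCounts (dict : List String) (p : String) :
    (pvPrefixCounts dict).getD p 0
      = (dict.countP (fun word => decide (p.toList <+: PySem.Chars.lower word.toList)) : Int) := by
  simp only [pvPrefixCounts]
  have hinner : ∀ (d : PySem.Dict String Int) (word : String),
      (PySem.List.pyRange 0 (PySem.Str.len (PySem.Str.lower word) + 1)).foldl
        (fun d i =>
          let q := PySem.Str.slice (PySem.Str.lower word) none (some i)
          d.insert q (d.getD q 0 + 1)) d
      = ((PySem.List.pyRange 0 (PySem.Str.len (PySem.Str.lower word) + 1)).map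
            (fun i => PySem.Str.slice (PySem.Str.lower word) none (some i))).foldl
          (fun d x => d.insert x (d.getD x 0 + 1)) d := by
    intro d word
    rw [List.foldl_map]
  simp only [hinner]
  rw [← List.foldl_flatMap, PySem.Dict.getD_foldl_insert_add_one]
  have hempty : (PySem.Dict.empty : PySem.Dict String Int).getD p 0 = 0 := rfl
  rw [hempty, zero_add, List.count_flatMap]
  have hmap : (dict.map (List.count p ∘ fun word =>
        (PySem.List.pyRange 0 (PySem.Str.len (PySem.Str.lower word) + 1)).map
          (fun i => PySem.Str.slice (PySem.Str.lower word) none (some i))))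
      = dict.map (fun word => if decide (p.toList <+: PySem.Chars.lower word.toList) then 1 else 0) := by
    refine List.map_congr_left (fun word _ => ?_)
    simp only [Function.comp_apply]
    rw [pv_count_slices, PySem.Str.toList_lower]
    by_cases h : p.toList <+: PySem.Chars.lower word.toList <;> simp [h]
  rw [hmap, pv_sum_ite]

theorem pv_counts_agree (dict : List String) (x : String) :
    (pvPrefixCounts dict).getD (PySem.Str.lower x) 0 = find_city_nbr dict x := by
  rw [pv_getD_prefixCounts, pv_find_eq_countP, PySem.Str.toList_lower]

-- ---- assembly ----

theorem pv_ports_eq (mp dict : List String) : sort_choice mp dict = sort_choice_alt mp dict := by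
  have hA : sort_choice mp dict
      = (PySem.List.sorted
          (PySem.List.sorted ((PySem.List.sorted mp pvLastOrd true).map
              (fun e => (find_city_nbr dict e, e)))
            (fun x => pvLastOrd x.2))
          (fun x => x.1) true).map (fun x => x.2) := by
    simp only [sort_choice, check_upper_order, PySem.List.foldl_append_singleton_eq_map,
      List.nil_append]
  rw [hA,
    pv_sorted_map (fun e => (find_city_nbr dict e, e)) _ (fun x : Int × String => pvLastOrd x.2) false,
    pv_sorted_sorted_rev,
    pv_sorted_map (fun e => (find_city_nbr dict e, e)) _ (fun x : Int × String => x.1) true,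
    pv_sorted_rev_neg,
    pv_two_pass _ pvLastOrd pv_lastOrd_bounds,
    List.map_map]
  have hid : ((fun x : Int × String => x.2) ∘ fun e => (find_city_nbr dict e, e)) = id := rfl
  rw [hid, List.map_id]
  simp only [sort_choice_alt]
  rw [pv_sorted2_eq _ _ _ pv_lastOrd_bounds]
  have hk : (fun x => -(pvPrefixCounts dict).getD (PySem.Str.lower x) 0 * 2097152 + pvLastOrd x)
      = (fun e => -find_city_nbr dict e * 2097152 + pvLastOrd e) := by
    funext x
    rw [pv_counts_agree]
  rw [hk]

-- ===== VERDICT (by name: the statement is the Claim_ definition above) =====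
theorem sort_choice_spec : Claim_equal_sort_choice := by
  intro mp dict _hDom _hPre
  unfold Spec_sort_choice
  exact pv_ports_eq mp dict
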